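-- pv_equiv track=rewrite | github.com/pytxxy/credittools | cardbin_proc.py | _generate_card_info_index_table
-- ===== SOURCE A (Python) =====
-- class CardInfoLabel:
--     prefix = 'prefix'
--     samediff = 'samediff'
--     code = 'code'
--     index = 'index'
--     length = 'length'
--
-- def _generate_card_info_index_table(card_info):
--     index_map = {}
--     for i in range(len(card_info)):
--         key = card_info[i][CardInfoLabel.prefix]
--         if key not in index_map:
--             index_map[key] = []
--
--         index_map[key].append(i + 1)
--
--     key_set = set()
--     recs = []
--     unit_sep = ', '
--     item_format = '["{}"] = {{{}}}'
--     item_sep = ',\r\n  '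
--     #         table_format = '{{\r\n  {}\r\n}}'
--
--     for item in card_info:
--         key = item[CardInfoLabel.prefix]
--         if key not in key_set:
--             key_set.add(key)
--             temp_strs = []
--             for index_item in index_map[key]:
--                 temp_strs.append(str(index_item))
--             rec_str = unit_sep.join(temp_strs)
--             rec_item = item_format.format(key, rec_str)
--             recs.append(rec_item)
--
--     sub_str_info = item_sep.join(recs)
--     #         str_info = table_format.format(sub_str_info)
--
--     return sub_str_info
-- ===== SOURCE B (Python) =====
-- def _generate_card_info_index_table(card_info):
--     index_map = {}
--     for i, item in enumerate(card_info, 1):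
--         index_map.setdefault(item['prefix'], []).append(i)
--     recs = ('["{}"] = {{{}}}'.format(key, ', '.join(map(str, indices)))
--             for key, indices in index_map.items())
--     return ',\r\n  '.join(recs)
-- ===== Notes on version B (the rewrite author's own statement) =====
-- stated objective: simpler
-- what changed: B builds the prefix->indices map in a single setdefault pass over enumerate(card_info, 1) and emits the table by iterating the map's items directly (insertion order = first-occurrence order), dropping A's key_set and its second guarded scan over card_info; index_map[key] access raises KeyError never since keys come from the same items.
import Mathlib
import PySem

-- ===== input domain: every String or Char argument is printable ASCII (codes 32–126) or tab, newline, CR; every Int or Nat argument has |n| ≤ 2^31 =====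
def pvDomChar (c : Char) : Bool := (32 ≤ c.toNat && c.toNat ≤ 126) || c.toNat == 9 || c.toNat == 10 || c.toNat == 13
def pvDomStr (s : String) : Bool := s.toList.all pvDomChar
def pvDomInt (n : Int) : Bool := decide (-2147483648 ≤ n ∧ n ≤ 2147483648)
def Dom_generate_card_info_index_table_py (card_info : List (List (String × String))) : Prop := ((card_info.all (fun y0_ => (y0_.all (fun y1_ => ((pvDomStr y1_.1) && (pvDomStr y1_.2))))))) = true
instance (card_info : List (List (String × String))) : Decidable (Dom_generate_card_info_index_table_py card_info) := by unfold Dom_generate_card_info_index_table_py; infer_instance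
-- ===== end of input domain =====

-- B replaces A's two-pass scheme (index map, then a key_set-guarded re-scan of card_info)
-- by one setdefault pass over enumerate and a direct traversal of the map's items: simpler.

-- ===== PORT A =====
def generate_card_info_index_table_py (card_info : List (List (String × String))) : String :=
  let index_map : PySem.Dict String (List Int) :=
    (PySem.List.pyRange 0 (card_info.length : Int)).foldl (fun m i =>
      let key := (PySem.Dict.mk (PySem.List.pyGetD card_info i [])).getD "prefix" ""
      let m1 := if m.contains key then m else m.insert key []
      m1.insert key (m1.getD key [] ++ [i + 1])) (PySem.Dict.mk [])
  let st := card_info.foldl (fun (st : PySem.Set String × List String) item =>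
      let key := (PySem.Dict.mk item).getD "prefix" ""
      if PySem.Set.contains st.1 key then st
      else
        let temp_strs := (index_map.getD key []).map PySem.Int.toStr
        let rec_str := PySem.Str.join ", " temp_strs
        let rec_item := PySem.Str.join "" ["[\"", key, "\"] = {", rec_str, "}"]
        (PySem.Set.add st.1 key, st.2 ++ [rec_item])) (PySem.Set.empty, [])
  PySem.Str.join ",\r\n  " st.2

-- ===== PORT B =====
def generate_card_info_index_table_py_alt (card_info : List (List (String × String))) : String :=
  let index_map : PySem.Dict String (List Int) :=
    (PySem.List.enumerate card_info 1).foldl (fun m p =>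
      m.modify ((PySem.Dict.mk p.2).getD "prefix" "") [] (· ++ [p.1])) (PySem.Dict.mk [])
  PySem.Str.join ",\r\n  " (index_map.items.map (fun p =>
    PySem.Str.join "" ["[\"", p.1, "\"] = {", PySem.Str.join ", " (p.2.map PySem.Int.toStr), "}"]))

-- ===== PRECONDITION & SPEC =====
-- Pre_ excludes items without a "prefix" key, on which Python A raises KeyError.
def Pre_generate_card_info_index_table_py (card_info : List (List (String × String))) : Prop :=
  ∀ item ∈ card_info, item.any (fun p => p.1 == "prefix")
instance (card_info : List (List (String × String))) : Decidable (Pre_generate_card_info_index_table_py card_info) := by unfold Pre_generate_card_info_index_table_py; infer_instance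
def pvWitness_generate_card_info_index_table_py : (List (List (String × String))) :=
  [[("prefix", "62")], [("prefix", "45"), ("code", "1")], [("prefix", "62")]]

def Spec_generate_card_info_index_table_py (card_info : List (List (String × String))) (out : String) : Prop := out = generate_card_info_index_table_py_alt card_info
instance (card_info : List (List (String × String))) (out : String) : Decidable (Spec_generate_card_info_index_table_py card_info out) := by unfold Spec_generate_card_info_index_table_py; infer_instance

-- ===== CLAIM (what is proved, stated in full; the proofs are below) =====
def Claim_equal_generate_card_info_index_table_py : Prop := ∀ (card_info : List (List (String × String))), Dom_generate_card_info_index_table_py card_info → Pre_generate_card_info_index_table_py card_info → Spec_generate_card_info_index_table_py card_info (generate_card_info_index_table_py card_info)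

-- ===== LEMMAS AND PROOFS =====

-- A's "if absent insert []; then append"-step is exactly dict.modify with default [].
theorem stepA_eq_modify (m : PySem.Dict String (List Int)) (key : String) (v : Int) :
    (let m1 := if m.contains key then m else m.insert key [];
     m1.insert key (m1.getD key [] ++ [v])) = m.modify key [] (· ++ [v]) := by
  by_cases h : m.contains key
  · simp [h, PySem.Dict.modify]
  · have h0 : m.contains key = false := by simpa using h
    have hg : m.getD key [] = [] := PySem.Dict.getD_of_not_contains _ _ h0
    simp [h, PySem.Dict.modify, hg, PySem.Dict.getD_insert_self,
      PySem.Dict.insert_insert_self]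

-- A's index loop over range(len(full)) equals B's loop over enumerate(full, 1).
theorem fold_range_eq_fold_enum {α β : Type} (full : List α) (d : α) (F : β → α → Int → β) :
    ∀ (n s : Nat) (m : β), full.length - s = n →
      (PySem.List.pyRange (s : Int) (full.length : Int)).foldl
          (fun m i => F m (PySem.List.pyGetD full i d) (i + 1)) m
        = (PySem.List.enumerate (full.drop s) ((s : Int) + 1)).foldl
            (fun m p => F m p.2 p.1) m := by
  intro n
  induction n with
  | zero =>
    intro s m h
    have hs : full.length ≤ s := by omega
    rw [PySem.List.pyRange_one_eq_nil (by exact_mod_cast hs),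
        List.drop_eq_nil_of_le hs]
    simp [PySem.List.enumerate]
  | succ k ih =>
    intro s m h
    have hs : s < full.length := by omega
    rw [PySem.List.pyRange_one_cons (by exact_mod_cast hs)]
    rw [List.drop_eq_getElem_cons hs, PySem.List.enumerate_cons]
    simp only [List.foldl_cons]
    rw [PySem.List.pyGetD_eq_getElem full d (by positivity) (by exact_mod_cast hs)]
    have := ih (s + 1) (F m full[(s : Int).toNat] ((s : Int) + 1)) (by omega)
    simp only [Int.toNat_natCast] at this ⊢
    push_cast at this ⊢
    convert this using 2

-- Set.update only appends.
theorem set_update_append {α : Type} [BEq α] [LawfulBEq α] :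
    ∀ (l : List α) (s : PySem.Set α), ∃ t, PySem.Set.update s l = s ++ t := by
  intro l
  induction l with
  | nil => exact fun s => ⟨[], by simp [PySem.Set.update]⟩
  | cons x xs ih =>
    intro s
    have hstep : PySem.Set.update s (x :: xs) = PySem.Set.update (PySem.Set.add s x) xs := by
      simp [PySem.Set.update]
    by_cases h : x ∈ s
    · obtain ⟨t, ht⟩ := ih s
      have hA : PySem.Set.add s x = s := by simp [PySem.Set.add, h]
      exact ⟨t, by rw [hstep, hA]; exact ht⟩
    · obtain ⟨t, ht⟩ := ih (s ++ [x])
      have hA : PySem.Set.add s x = s ++ [x] := by simp [PySem.Set.add, h]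
      refine ⟨[x] ++ t, ?_⟩
      rw [hstep, hA, ht]
      simp

-- A's second loop: records accumulate one formatted entry per first-seen prefix, in order.
theorem recs_loop (pfxL : List (String × String) → String) (fmtM : String → String) :
    ∀ (ys : List (List (String × String))) (seen : PySem.Set String) (recs : List String),
      (ys.foldl (fun st item =>
          if PySem.Set.contains st.1 (pfxL item) then st
          else (PySem.Set.add st.1 (pfxL item), st.2 ++ [fmtM (pfxL item)])) (seen, recs)).2
        = recs ++ ((PySem.Set.update seen (ys.map pfxL)).drop seen.length).map fmtM := by
  intro ys
  induction ys with
  | nil => intro seen recs; simp [PySem.Set.update]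
  | cons y ys ih =>
    intro seen recs
    simp only [List.foldl_cons, List.map_cons]
    have hupd : PySem.Set.update seen (pfxL y :: ys.map pfxL)
        = PySem.Set.update (PySem.Set.add seen (pfxL y)) (ys.map pfxL) := by
      simp [PySem.Set.update]
    by_cases h : pfxL y ∈ seen
    · have hc : PySem.Set.contains seen (pfxL y) = true := by simpa [PySem.Set.contains]
      have hA : PySem.Set.add seen (pfxL y) = seen := by simp [PySem.Set.add, h]
      rw [if_pos hc, ih, hupd, hA]
    · have hc : ¬ PySem.Set.contains seen (pfxL y) = true := by simpa [PySem.Set.contains]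
      have hA : PySem.Set.add seen (pfxL y) = seen ++ [pfxL y] := by simp [PySem.Set.add, h]
      rw [if_neg hc, ih, hupd, hA]
      obtain ⟨t, ht⟩ := set_update_append (ys.map pfxL) (seen ++ [pfxL y])
      rw [ht, List.append_assoc seen [pfxL y] t]
      have h1 : (seen ++ ([pfxL y] ++ t)).drop seen.length = [pfxL y] ++ t := List.drop_left
      have h2 : (seen ++ ([pfxL y] ++ t)).drop (seen ++ [pfxL y]).length = t := by
        have := (List.drop_left (l₁ := seen ++ [pfxL y]) (l₂ := t))
        rw [List.append_assoc] at this
        exact this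
      rw [h1, h2]
      simp

-- proof-only abbreviations
def pvPfx (item : List (String × String)) : String := (PySem.Dict.mk item).getD "prefix" ""
def pvFmt (M : PySem.Dict String (List Int)) (k : String) : String :=
  PySem.Str.join "" ["[\"", k, "\"] = {", PySem.Str.join ", " ((M.getD k []).map PySem.Int.toStr), "}"]
def pvMap (card_info : List (List (String × String))) : PySem.Dict String (List Int) :=
  (PySem.List.enumerate card_info 1).foldl
    (fun m p => m.modify (pvPfx p.2) [] (· ++ [p.1])) (PySem.Dict.mk [])

theorem hmap_eq (ci : List (List (String × String))) :
    (PySem.List.pyRange 0 (ci.length : Int)).foldl (fun m i =>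
      let key := (PySem.Dict.mk (PySem.List.pyGetD ci i [])).getD "prefix" ""
      let m1 := if m.contains key then m else m.insert key []
      m1.insert key (m1.getD key [] ++ [i + 1])) (PySem.Dict.mk [])
    = pvMap ci := by
  refine Eq.trans (fold_range_eq_fold_enum ci ([] : List (String × String))
      (fun m item j =>
        let key := (PySem.Dict.mk item).getD "prefix" ""
        let m1 := if m.contains key then m else m.insert key []
        m1.insert key (m1.getD key [] ++ [j]))
      ci.length 0 (PySem.Dict.mk []) rfl) ?_
  show (PySem.List.enumerate ci 1).foldl _ (PySem.Dict.mk []) = pvMap ci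
  unfold pvMap
  congr 1
  funext m p
  exact stepA_eq_modify m (pvPfx p.2) p.1

theorem keys_pvMap (ci : List (List (String × String))) :
    (pvMap ci).keys = PySem.Set.update [] (ci.map pvPfx) := by
  unfold pvMap
  rw [PySem.Dict.keys_foldl_modify_key]
  have hmk : (PySem.List.enumerate ci 1).map (fun p => pvPfx p.2) = ci.map pvPfx := by
    have := PySem.List.map_snd_enumerate ci 1
    calc (PySem.List.enumerate ci 1).map (fun p => pvPfx p.2)
        = ((PySem.List.enumerate ci 1).map (fun p => p.2)).map pvPfx := by
          rw [List.map_map]; rfl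
      _ = ci.map pvPfx := by rw [this]
  rw [hmk]
  rfl

theorem nodup_keys_pvMap (ci : List (List (String × String))) : (pvMap ci).keys.Nodup := by
  unfold pvMap
  exact PySem.Dict.nodup_keys_foldl_modify_key _ _ _ _ _ (by simp)

theorem main_eq (card_info : List (List (String × String))) :
    generate_card_info_index_table_py card_info = generate_card_info_index_table_py_alt card_info := by
  -- A's side: rewrite the index map, then collapse the guarded second scan
  have hA : generate_card_info_index_table_py card_info
      = PySem.Str.join ",\r\n  " ((card_info.foldl (fun st item =>
          if PySem.Set.contains st.1 (pvPfx item) then st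
          else (PySem.Set.add st.1 (pvPfx item), st.2 ++ [pvFmt (pvMap card_info) (pvPfx item)]))
          (PySem.Set.empty, ([] : List String))).2) := by
    simp only [generate_card_info_index_table_py]
    rw [hmap_eq card_info]
    rfl
  have hA2 := recs_loop pvPfx (pvFmt (pvMap card_info)) card_info PySem.Set.empty []
  -- B's side: items in insertion order are the first-occurrence prefixes with their lists
  have hB : generate_card_info_index_table_py_alt card_info
      = PySem.Str.join ",\r\n  " ((pvMap card_info).items.map (fun p =>
          PySem.Str.join "" ["[\"", p.1, "\"] = {", PySem.Str.join ", " (p.2.map PySem.Int.toStr), "}"])) := rfl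
  have hitems := PySem.Dict.items_eq_map_keys (pvMap card_info) (nodup_keys_pvMap card_info) []
  rw [hA, hA2, hB, hitems, keys_pvMap card_info]
  simp only [PySem.Set.empty, List.length_nil, List.drop_zero, List.nil_append, List.map_map]
  rfl

-- ===== VERDICT (by name: the statement is the Claim_ definition above) =====
theorem generate_card_info_index_table_py_spec : Claim_equal_generate_card_info_index_table_py := by
  intro card_info _ _
  exact main_eq card_info
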